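-- pv_equiv track=rewrite | github.com/alercebroker/web-services | lightcurve/src/probability_api/routes/htmx.py | filter_classifier_name_taxonomy
-- ===== SOURCE A (Python) =====
-- def filter_classifier_name_taxonomy(taxonomy_dict):
--     filter = ["lc_classifier", "lc_classifier_top", "stamp_classifier", "LC_classifier_BHRF_forced_phot(beta)", "LC_classifier_ATAT_forced_phot(beta)"]
--     pop_keys = []
--     for value in taxonomy_dict.keys():
--         if(taxonomy_dict[value]["classifier_name"] in filter):
--            pass
--         else:
--             pop_keys.append(value)
--
--     for x in range(len(pop_keys)):
--         taxonomy_dict.pop(pop_keys[x])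
--
--     taxonomy_dict = eliminated_duplicates_by_higher_version(taxonomy_dict)
--
--     return taxonomy_dict
--
-- def eliminated_duplicates_by_higher_version(taxonomy_dict):
--     # format of seen_classifiers dict: {classifier_name: key}
--     seen_classifiers = {}
--     filtered_taxonomy = {}
--
--     for key, value in taxonomy_dict.items():
--         classifier_name = value["classifier_name"]
--         if classifier_name not in seen_classifiers:
--             filtered_taxonomy[key] = value
--             seen_classifiers[classifier_name] = key
--         else:
--             oldKey = seen_classifiers[classifier_name]
--             if value["classifier_version"] > taxonomy_dict[oldKey]["classifier_version"]:
--                 filtered_taxonomy.pop(oldKey)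
--                 filtered_taxonomy[key] = value
--                 seen_classifiers[classifier_name] = key
--
--     return filtered_taxonomy
-- ===== SOURCE B (Python) =====
-- ALLOWED = {
--     "lc_classifier",
--     "lc_classifier_top",
--     "stamp_classifier",
--     "LC_classifier_BHRF_forced_phot(beta)",
--     "LC_classifier_ATAT_forced_phot(beta)",
-- }
--
--
-- def filter_classifier_name_taxonomy(taxonomy_dict):
--     for key in [k for k, v in taxonomy_dict.items()
--                 if v["classifier_name"] not in ALLOWED]:
--         del taxonomy_dict[key]
--
--     groups = {}
--     for key, value in taxonomy_dict.items():
--         groups.setdefault(value["classifier_name"], []).append((key, value))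
--
--     winners = set()
--     for group in groups.values():
--         best = group[0]
--         for kv in group[1:]:
--             if kv[1]["classifier_version"] > best[1]["classifier_version"]:
--                 best = kv
--         winners.add(best[0])
--
--     return {key: value for key, value in taxonomy_dict.items()
--             if key in winners}
-- ===== Notes on version B (the rewrite author's own statement) =====
-- stated objective: alternative
-- what changed: Replaces A's stateful single pass (a seen-classifier map with pop/re-insert surgery on the result dict) by group-then-select: bucket the whitelisted entries by classifier_name, pick the first highest-version entry of each bucket into a winner set, and keep exactly the winners; Pre_ excludes association lists with duplicate keys (not a faithful representation of a Python dict input) and the inputs where A raises KeyError (missing 'classifier_name', or 'classifier_version' missing on a duplicated whitelisted classifier) — B raises the same KeyError there.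
import Mathlib
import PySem

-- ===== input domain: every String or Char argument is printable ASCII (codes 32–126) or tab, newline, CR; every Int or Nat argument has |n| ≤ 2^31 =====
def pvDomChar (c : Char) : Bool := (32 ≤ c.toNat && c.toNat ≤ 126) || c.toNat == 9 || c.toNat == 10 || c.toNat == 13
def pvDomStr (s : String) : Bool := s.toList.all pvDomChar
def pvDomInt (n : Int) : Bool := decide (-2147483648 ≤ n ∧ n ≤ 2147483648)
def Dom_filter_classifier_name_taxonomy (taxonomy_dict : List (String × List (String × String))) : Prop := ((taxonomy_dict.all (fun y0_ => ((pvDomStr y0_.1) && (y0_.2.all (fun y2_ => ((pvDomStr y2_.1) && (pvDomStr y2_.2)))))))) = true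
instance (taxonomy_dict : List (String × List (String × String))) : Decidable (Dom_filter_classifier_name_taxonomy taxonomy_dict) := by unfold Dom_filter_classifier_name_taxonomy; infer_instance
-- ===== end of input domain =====

-- ===== PORT A =====
-- B replaces A's stateful dedup (seen-classifier map + pop/re-insert dict surgery) by
-- group-by-classifier then best-of-each-group; objective: alternative.
-- Both Pythons pop the non-whitelisted keys from their argument in place; the equivalence
-- proved here is about the RETURN value.
def pvFilterList : List String := ["lc_classifier", "lc_classifier_top", "stamp_classifier", "LC_classifier_BHRF_forced_phot(beta)", "LC_classifier_ATAT_forced_phot(beta)"]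

-- d[k] for the inner str->str dicts; Python raises KeyError when k is missing (excluded by Pre_)
def pvLookup (d : List (String × String)) (k : String) : String :=
  (PySem.Dict.mk d).getD k ""

def filter_classifier_name_taxonomy (taxonomy_dict : List (String × List (String × String))) : List (String × List (String × String)) :=
  let d := PySem.Dict.mk taxonomy_dict
  let popKeys : List String := d.keys.foldl (fun acc k =>
      if pvFilterList.contains (pvLookup (d.getD k []) "classifier_name") then acc else acc ++ [k]) []
  let d2 := popKeys.foldl (fun dd k => dd.erase k) d
  -- eliminated_duplicates_by_higher_version
  let st := d2.items.foldl (fun (st : PySem.Dict String String × PySem.Dict String (List (String × String))) kv =>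
      let name := pvLookup kv.2 "classifier_name"
      match st.1.get? name with
      | none => (st.1.insert name kv.1, st.2.insert kv.1 kv.2)
      | some oldKey =>
          if pvLookup (d2.getD oldKey []) "classifier_version" < pvLookup kv.2 "classifier_version" then
            (st.1.insert name kv.1, (st.2.erase oldKey).insert kv.1 kv.2)
          else st) (PySem.Dict.mk [], PySem.Dict.mk [])
  st.2.items

-- ===== PORT B =====
def pvAllowedSet : PySem.Set String := PySem.Set.ofList ["lc_classifier", "lc_classifier_top", "stamp_classifier", "LC_classifier_BHRF_forced_phot(beta)", "LC_classifier_ATAT_forced_phot(beta)"]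

def filter_classifier_name_taxonomy_alt (taxonomy_dict : List (String × List (String × String))) : List (String × List (String × String)) :=
  let d := PySem.Dict.mk taxonomy_dict
  let delKeys : List String := (d.items.filter (fun kv => !PySem.Set.contains pvAllowedSet (pvLookup kv.2 "classifier_name"))).map Prod.fst
  let d2 := delKeys.foldl (fun dd k => dd.erase k) d
  -- groups.setdefault(value["classifier_name"], []).append((key, value))
  let groups := d2.items.foldl (fun g kv =>
      g.modify (pvLookup kv.2 "classifier_name") [] (fun grp => grp ++ [kv])) PySem.Dict.empty
  let winners := groups.values.foldl (fun ws grp =>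
      match grp with
      | [] => ws  -- unreachable: every group is built by appending its members
      | b0 :: rest =>
          PySem.Set.add ws (rest.foldl (fun best kv =>
            if pvLookup best.2 "classifier_version" < pvLookup kv.2 "classifier_version" then kv else best) b0).1)
      PySem.Set.empty
  d2.items.filter (fun kv => PySem.Set.contains winners kv.1)

-- ===== PRECONDITION & SPEC =====
-- entry accessors (shorthands for the expressions both ports use)
def pvNm (kv : String × List (String × String)) : String := pvLookup kv.2 "classifier_name"
def pvP (kv : String × List (String × String)) : Bool := pvFilterList.contains (pvNm kv)

-- Pre_ excludes association lists with duplicate top-level or inner keys (they are not a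
-- faithful representation of a Python dict input), and the inputs where the Python raises
-- KeyError: an entry without "classifier_name", or a whitelisted classifier_name occurring
-- at least twice with some occurrence lacking "classifier_version" (A and B both raise there).
def Pre_filter_classifier_name_taxonomy (taxonomy_dict : List (String × List (String × String))) : Prop :=
  (taxonomy_dict.map Prod.fst).Nodup ∧
  (∀ kv ∈ taxonomy_dict, (kv.2.map Prod.fst).Nodup) ∧
  (∀ kv ∈ taxonomy_dict, "classifier_name" ∈ kv.2.map Prod.fst) ∧
  (∀ kv ∈ taxonomy_dict, pvP kv → 2 ≤ (taxonomy_dict.filter pvP).countP (fun kv' => pvNm kv' == pvNm kv) → "classifier_version" ∈ kv.2.map Prod.fst)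
instance (taxonomy_dict : List (String × List (String × String))) : Decidable (Pre_filter_classifier_name_taxonomy taxonomy_dict) := by unfold Pre_filter_classifier_name_taxonomy; infer_instance

def pvWitness_filter_classifier_name_taxonomy : (List (String × List (String × String))) :=
  [("k1", [("classifier_name", "lc_classifier"), ("classifier_version", "1.0")]),
   ("k2", [("classifier_name", "lc_classifier"), ("classifier_version", "2.0")]),
   ("k3", [("classifier_name", "other")])]

def Spec_filter_classifier_name_taxonomy (taxonomy_dict : List (String × List (String × String))) (out : List (String × List (String × String))) : Prop := out = filter_classifier_name_taxonomy_alt taxonomy_dict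
instance (taxonomy_dict : List (String × List (String × String))) (out : List (String × List (String × String))) : Decidable (Spec_filter_classifier_name_taxonomy taxonomy_dict out) := by unfold Spec_filter_classifier_name_taxonomy; infer_instance

-- ===== CLAIM (what is proved, stated in full; the proofs are below) =====
def Claim_equal_filter_classifier_name_taxonomy : Prop := ∀ (taxonomy_dict : List (String × List (String × String))), Dom_filter_classifier_name_taxonomy taxonomy_dict → Pre_filter_classifier_name_taxonomy taxonomy_dict → Spec_filter_classifier_name_taxonomy taxonomy_dict (filter_classifier_name_taxonomy taxonomy_dict)

-- ===== LEMMAS AND PROOFS =====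

def pvVr (kv : String × List (String × String)) : String := pvLookup kv.2 "classifier_version"

-- proof-side abbreviations for B's computation
def pvGrp (l : List (String × List (String × String))) (n : String) : List (String × List (String × String)) :=
  l.filter (fun kv => pvNm kv == n)

def pvBest (b0 : String × List (String × String)) (rest : List (String × List (String × String))) : String × List (String × String) :=
  rest.foldl (fun best kv => if pvVr best < pvVr kv then kv else best) b0

def pvBestOf (g : List (String × List (String × String))) : Option (String × List (String × String)) :=
  match g with
  | [] => none
  | b0 :: rest => some (pvBest b0 rest)

def pvGroups (l : List (String × List (String × String))) : PySem.Dict String (List (String × List (String × String))) :=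
  l.foldl (fun g kv => g.modify (pvNm kv) [] (fun grp => grp ++ [kv])) PySem.Dict.empty

def pvWinners (l : List (String × List (String × String))) : PySem.Set String :=
  (pvGroups l).values.foldl (fun ws grp =>
      match grp with
      | [] => ws
      | b0 :: rest => PySem.Set.add ws (pvBest b0 rest).1) PySem.Set.empty

def pvBCore (l : List (String × List (String × String))) : List (String × List (String × String)) :=
  l.filter (fun kv => PySem.Set.contains (pvWinners l) kv.1)

-- "x is a first maximum of g (by version)"
def pvFM (x : String × List (String × String)) (g : List (String × List (String × String))) : Prop :=
  ∃ u v, g = u ++ x :: v ∧ (∀ w ∈ u, pvVr w < pvVr x) ∧ (∀ w ∈ v, ¬ pvVr x < pvVr w)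

-- A-side declarative select (bridge between the two ports)
def pvKeep (before : List (String × List (String × String))) (value : List (String × String)) (after : List (String × List (String × String))) : Bool :=
  let name := pvLookup value "classifier_name"
  let version := pvLookup value "classifier_version"
  if before.any (fun kv => pvLookup kv.2 "classifier_name" == name && !decide (pvLookup kv.2 "classifier_version" < version)) then false
  else after.all (fun kv => !(pvLookup kv.2 "classifier_name" == name) || !decide (version < pvLookup kv.2 "classifier_version"))

def pvSelect (before rest : List (String × List (String × String))) : List (String × List (String × String)) :=
  match rest with
  | [] => []
  | kv :: rest' =>
      if pvKeep before kv.2 rest' then kv :: pvSelect (before ++ [kv]) rest'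
      else pvSelect (before ++ [kv]) rest'

-- the survive-x test pvSelect_append factors out
def pvFx (x kv : String × List (String × String)) : Bool :=
  !(pvNm kv == pvNm x) || !decide (pvVr kv < pvVr x)

-- the body of A's dedup loop, with the ambient dict abstracted
def pvStep (dd : PySem.Dict String (List (String × String)))
    (st : PySem.Dict String String × PySem.Dict String (List (String × String)))
    (kv : String × List (String × String)) :
    PySem.Dict String String × PySem.Dict String (List (String × String)) :=
  let name := pvLookup kv.2 "classifier_name"
  match st.1.get? name with
  | none => (st.1.insert name kv.1, st.2.insert kv.1 kv.2)
  | some oldKey =>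
      if pvLookup (dd.getD oldKey []) "classifier_version" < pvLookup kv.2 "classifier_version" then
        (st.1.insert name kv.1, (st.2.erase oldKey).insert kv.1 kv.2)
      else st

def pvStF (t p : List (String × List (String × String))) :
    PySem.Dict String String × PySem.Dict String (List (String × String)) :=
  p.foldl (pvStep (PySem.Dict.mk t)) (PySem.Dict.mk [], PySem.Dict.mk [])

-- the invariant tying A's loop state after prefix p to the declarative selection
def pvINV (t p : List (String × List (String × String))) : Prop :=
  ((pvStF t p).2.items = pvSelect [] p) ∧
  (∀ n : String, (pvStF t p).1.get? n = ((pvSelect [] p).find? (fun kv => pvNm kv == n)).map Prod.fst) ∧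
  (∀ kv kv', kv ∈ pvSelect [] p → kv' ∈ pvSelect [] p → pvNm kv = pvNm kv' → kv = kv') ∧
  (∀ y ∈ p, ∃ w ∈ pvSelect [] p, pvNm w = pvNm y) ∧
  (∀ y ∈ p, ∀ w ∈ pvSelect [] p, pvNm y = pvNm w → ¬ (pvVr w < pvVr y))

lemma pvLookup_mk (l : List (String × List (String × String)))
    (hN : (l.map Prod.fst).Nodup) {kv : String × List (String × String)} (h : kv ∈ l) :
    (PySem.Dict.mk l).getD kv.1 [] = kv.2 := by
  exact PySem.Dict.getD_of_mem_items _ h hN []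

lemma pv_key_inj {l : List (String × List (String × String))}
    (hN : (l.map Prod.fst).Nodup) {kv kv' : String × List (String × String)}
    (h1 : kv ∈ l) (h2 : kv' ∈ l) (he : kv.1 = kv'.1) : kv = kv' := by
  exact List.inj_on_of_nodup_map hN h1 h2 he

lemma pvSelect_subset : ∀ (l b : List (String × List (String × String))) kv,
    kv ∈ pvSelect b l → kv ∈ l := by
  intro l
  induction l with
  | nil => intro b kv h; cases h
  | cons a l ih =>
    intro b kv h
    unfold pvSelect at h
    by_cases hk : pvKeep b a.2 l
    · rw [if_pos hk] at h
      rcases List.mem_cons.mp h with h | h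
      · exact h ▸ List.mem_cons_self
      · exact List.mem_cons_of_mem _ (ih _ _ h)
    · rw [if_neg hk] at h
      exact List.mem_cons_of_mem _ (ih _ _ h)

lemma pvKeep_append_single (b l : List (String × List (String × String)))
    (v : List (String × String)) (x : String × List (String × String)) :
    pvKeep b v (l ++ [x]) =
      (pvKeep b v l && (!(pvLookup x.2 "classifier_name" == pvLookup v "classifier_name")
        || !decide (pvLookup v "classifier_version" < pvLookup x.2 "classifier_version"))) := by
  show (if (b.any fun kv => pvLookup kv.2 "classifier_name" == pvLookup v "classifier_name" && !decide (pvLookup kv.2 "classifier_version" < pvLookup v "classifier_version")) = true then false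
        else (l ++ [x]).all fun kv => !(pvLookup kv.2 "classifier_name" == pvLookup v "classifier_name") || !decide (pvLookup v "classifier_version" < pvLookup kv.2 "classifier_version")) = _
  have hK : pvKeep b v l = (if (b.any fun kv => pvLookup kv.2 "classifier_name" == pvLookup v "classifier_name" && !decide (pvLookup kv.2 "classifier_version" < pvLookup v "classifier_version")) = true then false
        else l.all fun kv => !(pvLookup kv.2 "classifier_name" == pvLookup v "classifier_name") || !decide (pvLookup v "classifier_version" < pvLookup kv.2 "classifier_version")) := rfl
  rw [hK]
  by_cases hb : (b.any fun kv => pvLookup kv.2 "classifier_name" == pvLookup v "classifier_name" && !decide (pvLookup kv.2 "classifier_version" < pvLookup v "classifier_version")) = true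
  · rw [if_pos hb, if_pos hb, Bool.false_and]
  · rw [if_neg hb, if_neg hb, List.all_append, List.all_cons, List.all_nil, Bool.and_true]

lemma pvSelect_append (x : String × List (String × String)) :
    ∀ (l b : List (String × List (String × String))),
    pvSelect b (l ++ [x]) =
      (pvSelect b l).filter (pvFx x) ++ (if pvKeep (b ++ l) x.2 [] then [x] else []) := by
  intro l
  induction l with
  | nil =>
    intro b
    show (if pvKeep b x.2 [] then x :: pvSelect (b ++ [x]) [] else pvSelect (b ++ [x]) []) = _
    rw [List.append_nil]
    by_cases h : pvKeep b x.2 []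
    · rw [if_pos h, if_pos h]; rfl
    · rw [if_neg h, if_neg h]; rfl
  | cons a l ih =>
    intro b
    have hsel : pvSelect b (a :: (l ++ [x])) = if pvKeep b a.2 (l ++ [x]) then a :: pvSelect (b ++ [a]) (l ++ [x]) else pvSelect (b ++ [a]) (l ++ [x]) := rfl
    have hsel2 : pvSelect b (a :: l) = if pvKeep b a.2 l then a :: pvSelect (b ++ [a]) l else pvSelect (b ++ [a]) l := rfl
    have hfx : pvFx x a = (!(pvLookup x.2 "classifier_name" == pvLookup a.2 "classifier_name") || !decide (pvLookup a.2 "classifier_version" < pvLookup x.2 "classifier_version")) := by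
      unfold pvFx pvNm pvVr
      rw [Bool.beq_comm]
    rw [List.cons_append, hsel, pvKeep_append_single, ← hfx, hsel2]
    cases hK : pvKeep b a.2 l
    · simp [ih]
    · cases hE : pvFx x a <;> simp [hE, ih]

lemma pvFind?_filter {q pred : (String × List (String × String)) → Bool}
    (l : List (String × List (String × String)))
    (h : ∀ kv ∈ l, q kv = false → pred kv = false) :
    (l.filter q).find? pred = l.find? pred := by
  induction l with
  | nil => rfl
  | cons a l ih =>
    have ih' := ih (fun kv hm => h kv (List.mem_cons_of_mem _ hm))
    simp only [List.filter_cons]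
    by_cases hq : q a
    · simp only [hq, if_true]
      rw [List.find?_cons, List.find?_cons]
      cases hp : pred a <;> simp [ih']
    · have hpa : pred a = false := h a List.mem_cons_self (by simpa using hq)
      rw [if_neg hq, ih', List.find?_cons_of_neg (by simp [hpa])]

-- popKeys loop: keys of the entries whose classifier_name is not whitelisted
lemma pv_popKeys (td : List (String × List (String × String)))
    (hN : (td.map Prod.fst).Nodup) :
    ∀ (l : List (String × List (String × String))) (acc : List String), (∀ kv ∈ l, kv ∈ td) →
    (l.map Prod.fst).foldl (fun acc k =>
        if pvFilterList.contains (pvLookup ((PySem.Dict.mk td).getD k []) "classifier_name") then acc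
        else acc ++ [k]) acc
      = acc ++ (l.filter (fun kv => !pvP kv)).map Prod.fst := by
  intro l
  induction l with
  | nil => intro acc h; simp
  | cons kv l ih =>
    intro acc h
    have hkv : (PySem.Dict.mk td).getD kv.1 [] = kv.2 := pvLookup_mk td hN (h kv List.mem_cons_self)
    simp only [List.map_cons, List.foldl_cons]
    rw [hkv]
    by_cases hp : pvFilterList.contains (pvLookup kv.2 "classifier_name")
    · have hpv : (!pvP kv) = false := by simp only [pvP, pvNm, hp, Bool.not_true]
      rw [if_pos hp, ih acc (fun y hy => h y (List.mem_cons_of_mem _ hy)), List.filter_cons, hpv]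
      simp only [Bool.false_eq_true, if_false]
    · have hc : pvFilterList.contains (pvLookup kv.2 "classifier_name") = false := by simpa using hp
      have hpv : (!pvP kv) = true := by simp only [pvP, pvNm, hc, Bool.not_false]
      rw [if_neg hp, ih (acc ++ [kv.1]) (fun y hy => h y (List.mem_cons_of_mem _ hy)), List.filter_cons, hpv]
      simp only [if_true, List.map_cons]
      simp

lemma pv_erase_fold (ks : List String) :
    ∀ (d : PySem.Dict String (List (String × String))),
    (ks.foldl (fun dd k => dd.erase k) d).items
      = d.items.filter (fun p => !ks.contains p.1) := by
  induction ks with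
  | nil => intro d; simp
  | cons k ks ih =>
    intro d
    rw [List.foldl_cons, ih]
    show (d.items.filter fun p => !p.1 == k).filter _ = _
    rw [List.filter_filter]
    apply List.filter_congr
    intro kv _
    by_cases h : kv.1 = k <;> simp [h, Bool.and_comm]

-- erasing the non-whitelisted keys leaves the whitelisted entries
lemma pv_erase_phase (td : List (String × List (String × String)))
    (hN : (td.map Prod.fst).Nodup) :
    (((td.filter (fun kv => !pvP kv)).map Prod.fst).foldl (fun dd k => dd.erase k) (PySem.Dict.mk td))
      = PySem.Dict.mk (td.filter pvP) := by
  apply PySem.Dict.ext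
  rw [pv_erase_fold]
  show td.filter _ = td.filter pvP
  apply List.filter_congr
  intro kv hkv
  by_cases hp : pvP kv
  · rw [hp]
    have hnm : kv.1 ∉ (td.filter (fun kv => !pvP kv)).map Prod.fst := by
      intro hmem
      obtain ⟨kv', hkv', he⟩ := List.mem_map.mp hmem
      have hkv'm := List.mem_of_mem_filter hkv'
      have hfp := List.of_mem_filter hkv'
      rw [pv_key_inj hN hkv'm hkv he, hp] at hfp
      simp at hfp
    simp [hnm]
  · have hmem : kv.1 ∈ (td.filter (fun kv => !pvP kv)).map Prod.fst :=
      List.mem_map.mpr ⟨kv, List.mem_filter.mpr ⟨hkv, by simp [hp]⟩, rfl⟩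
    have hp' : pvP kv = false := by simpa using hp
    simp [hmem, hp']

-- A's first two loops amount to filtering the whitelisted entries
lemma pv_phase1 (td : List (String × List (String × String)))
    (hN : (td.map Prod.fst).Nodup) :
    filter_classifier_name_taxonomy td = (pvStF (td.filter pvP) (td.filter pvP)).2.items := by
  have hpop : (PySem.Dict.mk td).keys.foldl (fun acc k =>
      if pvFilterList.contains (pvLookup ((PySem.Dict.mk td).getD k []) "classifier_name") then acc
      else acc ++ [k]) [] = (td.filter (fun kv => !pvP kv)).map Prod.fst := by
    simpa using pv_popKeys td hN td [] (fun kv h => h)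
  have e1 : filter_classifier_name_taxonomy td =
      ((((PySem.Dict.mk td).keys.foldl (fun acc k =>
          if pvFilterList.contains (pvLookup ((PySem.Dict.mk td).getD k []) "classifier_name") then acc
          else acc ++ [k]) []).foldl (fun dd k => dd.erase k) (PySem.Dict.mk td)).items.foldl
        (pvStep (((PySem.Dict.mk td).keys.foldl (fun acc k =>
          if pvFilterList.contains (pvLookup ((PySem.Dict.mk td).getD k []) "classifier_name") then acc
          else acc ++ [k]) []).foldl (fun dd k => dd.erase k) (PySem.Dict.mk td)))
        (PySem.Dict.mk [], PySem.Dict.mk [])).2.items := rfl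
  rw [e1, hpop, pv_erase_phase td hN]
  rfl

-- B's first loop amounts to the same filtering
lemma pv_phase1_alt (td : List (String × List (String × String)))
    (hN : (td.map Prod.fst).Nodup) :
    filter_classifier_name_taxonomy_alt td = pvBCore (td.filter pvP) := by
  have hpred : ∀ kv : String × List (String × String),
      (!PySem.Set.contains pvAllowedSet (pvLookup kv.2 "classifier_name")) = (!pvP kv) := by
    intro kv
    rfl
  have hdel : ((PySem.Dict.mk td).items.filter (fun kv => !PySem.Set.contains pvAllowedSet (pvLookup kv.2 "classifier_name"))).map Prod.fst
      = (td.filter (fun kv => !pvP kv)).map Prod.fst := by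
    show (td.filter _).map Prod.fst = _
    rw [List.filter_congr (fun kv _ => hpred kv)]
  show ((((PySem.Dict.mk td).items.filter (fun kv => !PySem.Set.contains pvAllowedSet (pvLookup kv.2 "classifier_name"))).map Prod.fst).foldl (fun dd k => dd.erase k) (PySem.Dict.mk td)).items.filter _ = _
  rw [hdel, pv_erase_phase td hN]
  rfl

lemma pvKeep_nil_iff (b : List (String × List (String × String))) (x : String × List (String × String)) :
    pvKeep b x.2 [] = true ↔ ∀ kv ∈ b, pvNm kv = pvNm x → pvVr kv < pvVr x := by
  show (if (b.any fun kv => pvLookup kv.2 "classifier_name" == pvLookup x.2 "classifier_name" && !decide (pvLookup kv.2 "classifier_version" < pvLookup x.2 "classifier_version")) = true then false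
        else ([] : List (String × List (String × String))).all fun kv => !(pvLookup kv.2 "classifier_name" == pvLookup x.2 "classifier_name") || !decide (pvLookup x.2 "classifier_version" < pvLookup kv.2 "classifier_version")) = true ↔ _
  by_cases hb : (b.any fun kv => pvLookup kv.2 "classifier_name" == pvLookup x.2 "classifier_name" && !decide (pvLookup kv.2 "classifier_version" < pvLookup x.2 "classifier_version")) = true
  · rw [if_pos hb]
    simp only [List.any_eq_true] at hb
    obtain ⟨kv, hkv, hpred⟩ := hb
    simp only [Bool.and_eq_true, beq_iff_eq, Bool.not_eq_true', decide_eq_false_iff_not] at hpred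
    constructor
    · intro h; cases h
    · intro h
      exact absurd (h kv hkv hpred.1) hpred.2
  · rw [if_neg hb]
    simp only [List.any_eq_true, not_exists] at hb
    constructor
    · intro _ kv hkv hnm
      by_contra hlt
      exact hb kv ⟨hkv, by simp [pvNm, pvVr] at hnm hlt ⊢; exact ⟨hnm, hlt⟩⟩
    · intro _; rfl

lemma pv_inv_step (t : List (String × List (String × String)))
    (hN : (t.map Prod.fst).Nodup)
    (p : List (String × List (String × String))) (x : String × List (String × String))
    (rest : List (String × List (String × String))) (ht : t = p ++ x :: rest)
    (hinv : pvINV t p) : pvINV t (p ++ [x]) := by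
  obtain ⟨ha, hb, hc, hd, he⟩ := hinv
  have hmem_p : ∀ kv ∈ p, kv ∈ t := fun kv h => ht ▸ List.mem_append_left _ h
  have hmem_sel : ∀ kv ∈ pvSelect [] p, kv ∈ p := fun kv h => pvSelect_subset p [] kv h
  have hNsplit := hN
  rw [ht, List.map_append, List.nodup_append] at hNsplit
  have hNp : (p.map Prod.fst).Nodup := hNsplit.1
  have hfresh : x.1 ∉ p.map Prod.fst := fun hm => hNsplit.2.2 _ hm x.1 (by simp) rfl
  have hxkeys : x.1 ∉ (pvSelect [] p).map Prod.fst := fun hm => by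
    obtain ⟨kv, hkv, he'⟩ := List.mem_map.mp hm
    exact hfresh (List.mem_map.mpr ⟨kv, hmem_sel kv hkv, he'⟩)
  have hcont : (pvStF t p).2.contains x.1 = false := by
    rw [PySem.Dict.contains_eq_decide_mem_keys]
    simp only [PySem.Dict.keys, ha]
    exact decide_eq_false hxkeys
  have hst : pvStF t (p ++ [x]) = pvStep (PySem.Dict.mk t) (pvStF t p) x := by
    simp [pvStF, List.foldl_append]
  have hsa := pvSelect_append x p []
  have hstep : pvStep (PySem.Dict.mk t) (pvStF t p) x =
      (match ((pvSelect [] p).find? (fun kv => pvNm kv == pvNm x)).map Prod.fst with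
      | none => ((pvStF t p).1.insert (pvNm x) x.1, (pvStF t p).2.insert x.1 x.2)
      | some oldKey =>
          if pvLookup ((PySem.Dict.mk t).getD oldKey []) "classifier_version" < pvVr x then
            ((pvStF t p).1.insert (pvNm x) x.1, ((pvStF t p).2.erase oldKey).insert x.1 x.2)
          else pvStF t p) := by
    rw [show pvStep (PySem.Dict.mk t) (pvStF t p) x = (match (pvStF t p).1.get? (pvNm x) with
      | none => ((pvStF t p).1.insert (pvNm x) x.1, (pvStF t p).2.insert x.1 x.2)
      | some oldKey =>
          if pvLookup ((PySem.Dict.mk t).getD oldKey []) "classifier_version" < pvVr x then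
            ((pvStF t p).1.insert (pvNm x) x.1, ((pvStF t p).2.erase oldKey).insert x.1 x.2)
          else pvStF t p) from rfl, hb]
  cases hfind : (pvSelect [] p).find? (fun kv => pvNm kv == pvNm x) with
  | none =>
    rw [hfind] at hstep
    simp only [Option.map_none] at hstep
    have hnone : ∀ y ∈ p, ¬ (pvNm y = pvNm x) := by
      intro y hy hny
      obtain ⟨w, hw, hwn⟩ := hd y hy
      have hcontr := List.find?_eq_none.mp hfind w hw
      simp [hwn, hny] at hcontr
    have hkeep : pvKeep p x.2 [] = true :=
      (pvKeep_nil_iff p x).mpr (fun kv hkv hnm => absurd hnm (hnone kv hkv))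
    have hfilter : (pvSelect [] p).filter (pvFx x) = pvSelect [] p := by
      apply List.filter_eq_self.mpr
      intro kv hkv
      have hne : ¬ (pvNm kv = pvNm x) := hnone kv (hmem_sel kv hkv)
      simp [pvFx, hne]
    have hsel' : pvSelect [] (p ++ [x]) = pvSelect [] p ++ [x] := by
      rw [hsa, hfilter, show pvKeep ([] ++ p) x.2 [] = true from hkeep]
      simp
    refine ⟨?_, ?_, ?_, ?_, ?_⟩
    · rw [hst, hstep, hsel']
      show ((pvStF t p).2.insert x.1 x.2).items = _
      rw [PySem.Dict.items_insert_of_not_contains _ _ hcont, ha]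
    · intro n
      rw [hst, hstep, hsel']
      show ((pvStF t p).1.insert (pvNm x) x.1).get? n = _
      rw [PySem.Dict.get?_insert, List.find?_append]
      by_cases hn : n = pvNm x
      · rw [if_pos hn, hn]
        rw [hfind]
        simp
      · rw [if_neg hn, hb n]
        have hxn : (pvNm x == n) = false := by simpa using fun hh => hn hh.symm
        cases hfs : (pvSelect [] p).find? (fun kv => pvNm kv == n) <;> simp [hxn]
    · rw [hsel']
      intro kv kv' hkv hkv' hnm
      rcases List.mem_append.mp hkv with h1 | h1 <;> rcases List.mem_append.mp hkv' with h2 | h2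
      · exact hc kv kv' h1 h2 hnm
      · have : kv' = x := by simpa using h2
        subst this
        exact absurd hnm (hnone kv (hmem_sel kv h1))
      · have : kv = x := by simpa using h1
        subst this
        exact absurd hnm.symm (hnone kv' (hmem_sel kv' h2))
      · have h1' : kv = x := by simpa using h1
        have h2' : kv' = x := by simpa using h2
        rw [h1', h2']
    · rw [hsel']
      intro y hy
      rcases List.mem_append.mp hy with h1 | h1
      · obtain ⟨w, hw, hwn⟩ := hd y h1
        exact ⟨w, List.mem_append_left _ hw, hwn⟩
      · have hyx : y = x := by simpa using h1
        exact ⟨x, List.mem_append_right _ (by simp), by rw [hyx]⟩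
    · rw [hsel']
      intro y hy w hw hnm
      rcases List.mem_append.mp hy with h1 | h1 <;> rcases List.mem_append.mp hw with h2 | h2
      · exact he y h1 w h2 hnm
      · have : w = x := by simpa using h2
        subst this
        exact absurd hnm (hnone y h1)
      · have hyx : y = x := by simpa using h1
        rw [hyx] at hnm
        exact absurd hnm.symm (hnone w (hmem_sel w h2))
      · have h1' : y = x := by simpa using h1
        have h2' : w = x := by simpa using h2
        rw [h1', h2']
        exact lt_irrefl _
  | some e =>
    rw [hfind] at hstep
    simp only [Option.map_some] at hstep
    have hes : e ∈ pvSelect [] p := List.mem_of_find?_eq_some hfind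
    have hen : pvNm e = pvNm x := by
      have := List.find?_some hfind
      simpa using this
    have hep : e ∈ p := hmem_sel e hes
    have hlk : (PySem.Dict.mk t).getD e.1 [] = e.2 := pvLookup_mk t hN (hmem_p e hep)
    rw [hlk] at hstep
    by_cases hlt : pvLookup e.2 "classifier_version" < pvVr x
    · rw [if_pos hlt] at hstep
      have hlt' : pvVr e < pvVr x := hlt
      have hkeep : pvKeep p x.2 [] = true := (pvKeep_nil_iff p x).mpr (by
        intro kv hkv hnm
        have hle : ¬ pvVr e < pvVr kv := he kv hkv e hes (hnm.trans hen.symm)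
        exact lt_of_le_of_lt (not_lt.mp hle) hlt')
      have hfilter2 : (pvSelect [] p).filter (pvFx x) = (pvSelect [] p).filter (fun kv => !(kv.1 == e.1)) := by
        apply List.filter_congr
        intro kv hkv
        by_cases hsame : pvNm kv = pvNm x
        · have hkve : kv = e := hc kv e hkv hes (hsame.trans hen.symm)
          rw [hkve]
          simp [pvFx, hen, hlt']
        · have hkne : kv.1 ≠ e.1 := by
            intro hkk
            exact hsame ((pv_key_inj hNp (hmem_sel kv hkv) hep hkk) ▸ hen)
          have hb1 : (pvNm kv == pvNm x) = false := beq_eq_false_iff_ne.mpr hsame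
          have hb2 : (kv.1 == e.1) = false := beq_eq_false_iff_ne.mpr hkne
          simp [pvFx, hb1, hb2]
      have hsel' : pvSelect [] (p ++ [x]) = (pvSelect [] p).filter (fun kv => !(kv.1 == e.1)) ++ [x] := by
        rw [hsa, hfilter2, show pvKeep ([] ++ p) x.2 [] = true from hkeep]
        simp
      have hcont2 : ((pvStF t p).2.erase e.1).contains x.1 = false := by
        rw [PySem.Dict.contains_eq_decide_mem_keys]
        apply decide_eq_false
        show x.1 ∉ ((pvStF t p).2.items.filter (fun q => !(q.1 == e.1))).map Prod.fst
        intro hm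
        obtain ⟨kv, hkv, hk1⟩ := List.mem_map.mp hm
        have hmm : kv ∈ (pvStF t p).2.items := List.mem_of_mem_filter hkv
        rw [ha] at hmm
        exact hxkeys (List.mem_map.mpr ⟨kv, hmm, hk1⟩)
      refine ⟨?_, ?_, ?_, ?_, ?_⟩
      · rw [hst, hstep, hsel']
        show (((pvStF t p).2.erase e.1).insert x.1 x.2).items = _
        rw [PySem.Dict.items_insert_of_not_contains _ _ hcont2]
        show ((pvStF t p).2.items.filter (fun q => !(q.1 == e.1))) ++ [x] = _
        rw [ha]
      · intro n
        rw [hst, hstep, hsel']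
        show ((pvStF t p).1.insert (pvNm x) x.1).get? n = _
        rw [PySem.Dict.get?_insert, List.find?_append]
        by_cases hn : n = pvNm x
        · rw [if_pos hn, hn]
          have hfnone : ((pvSelect [] p).filter (fun kv => !(kv.1 == e.1))).find? (fun kv => pvNm kv == pvNm x) = none := by
            apply List.find?_eq_none.mpr
            intro kv hkv hbeq
            have hkvs := List.mem_of_mem_filter hkv
            have hfl := List.of_mem_filter hkv
            have hkve : kv = e := hc kv e hkvs hes ((by simpa using hbeq : pvNm kv = pvNm x).trans hen.symm)
            rw [hkve] at hfl
            simp at hfl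
          rw [hfnone]
          simp
        · rw [if_neg hn, hb n]
          have hxn : (pvNm x == n) = false := by simpa using fun hh => hn hh.symm
          have hff : ((pvSelect [] p).filter (fun kv => !(kv.1 == e.1))).find? (fun kv => pvNm kv == n) = (pvSelect [] p).find? (fun kv => pvNm kv == n) := by
            apply pvFind?_filter
            intro kv hkv hq
            have hkv1 : kv.1 = e.1 := by simpa using hq
            have hkve : kv = e := pv_key_inj hNp (hmem_sel kv hkv) hep hkv1
            rw [hkve, hen]
            simpa using fun hh => hn hh.symm
          rw [hff]
          cases hfs : (pvSelect [] p).find? (fun kv => pvNm kv == n) <;> simp [hxn]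
      · rw [hsel']
        intro kv kv' hkv hkv' hnm
        rcases List.mem_append.mp hkv with h1 | h1 <;> rcases List.mem_append.mp hkv' with h2 | h2
        · exact hc kv kv' (List.mem_of_mem_filter h1) (List.mem_of_mem_filter h2) hnm
        · have h2' : kv' = x := by simpa using h2
          rw [h2'] at hnm
          have hkve : kv = e := hc kv e (List.mem_of_mem_filter h1) hes (hnm.trans hen.symm)
          have hfl := List.of_mem_filter h1
          rw [hkve] at hfl
          simp at hfl
        · have h1' : kv = x := by simpa using h1
          rw [h1'] at hnm
          have hkve : kv' = e := hc kv' e (List.mem_of_mem_filter h2) hes (hnm.symm.trans hen.symm)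
          have hfl := List.of_mem_filter h2
          rw [hkve] at hfl
          simp at hfl
        · rw [(by simpa using h1 : kv = x), (by simpa using h2 : kv' = x)]
      · rw [hsel']
        intro y hy
        rcases List.mem_append.mp hy with h1 | h1
        · by_cases hsame : pvNm y = pvNm x
          · exact ⟨x, List.mem_append_right _ (by simp), hsame.symm⟩
          · obtain ⟨w, hw, hwn⟩ := hd y h1
            have hwx : pvNm w ≠ pvNm x := by rw [hwn]; exact hsame
            have hwe : w.1 ≠ e.1 := fun hh => hwx ((pv_key_inj hNp (hmem_sel w hw) hep hh) ▸ hen)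
            exact ⟨w, List.mem_append_left _ (List.mem_filter.mpr ⟨hw, by simpa using hwe⟩), hwn⟩
        · have hyx : y = x := by simpa using h1
          exact ⟨x, List.mem_append_right _ (by simp), by rw [hyx]⟩
      · rw [hsel']
        intro y hy w hw hnm
        rcases List.mem_append.mp hy with h1 | h1 <;> rcases List.mem_append.mp hw with h2 | h2
        · exact he y h1 w (List.mem_of_mem_filter h2) hnm
        · have h2' : w = x := by simpa using h2
          have hye : pvNm y = pvNm e := by rw [hnm, h2', hen]
          have hle := he y h1 e hes hye
          rw [h2']
          exact lt_asymm (lt_of_le_of_lt (not_lt.mp hle) hlt')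
        · have h1' : y = x := by simpa using h1
          have hwx : pvNm w = pvNm x := by rw [← hnm, h1']
          have hwe : w = e := hc w e (List.mem_of_mem_filter h2) hes (hwx.trans hen.symm)
          have hfl := List.of_mem_filter h2
          rw [hwe] at hfl
          simp at hfl
        · rw [(by simpa using h1 : y = x), (by simpa using h2 : w = x)]
          exact lt_irrefl _
    · rw [if_neg hlt] at hstep
      have hlt' : ¬ pvVr e < pvVr x := hlt
      have hkeepf : pvKeep ([] ++ p) x.2 [] = false := by
        cases hcase : pvKeep p x.2 []
        · exact hcase
        · exact absurd ((pvKeep_nil_iff p x).mp hcase e hep hen) hlt'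
      have hfilter3 : (pvSelect [] p).filter (pvFx x) = pvSelect [] p := by
        apply List.filter_eq_self.mpr
        intro kv hkv
        by_cases hsame : pvNm kv = pvNm x
        · have hkve : kv = e := hc kv e hkv hes (hsame.trans hen.symm)
          rw [hkve]
          simp [pvFx, hlt']
        · have hb1 : (pvNm kv == pvNm x) = false := beq_eq_false_iff_ne.mpr hsame
          simp [pvFx, hb1]
      have hsel' : pvSelect [] (p ++ [x]) = pvSelect [] p := by
        rw [hsa, hfilter3, hkeepf]
        simp
      refine ⟨?_, ?_, ?_, ?_, ?_⟩
      · rw [hst, hstep, hsel', ha]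
      · intro n
        rw [hst, hstep, hsel']
        exact hb n
      · rw [hsel']
        exact hc
      · rw [hsel']
        intro y hy
        rcases List.mem_append.mp hy with h1 | h1
        · exact hd y h1
        · have hyx : y = x := by simpa using h1
          exact ⟨e, hes, by rw [hyx]; exact hen⟩
      · rw [hsel']
        intro y hy w hw hnm
        rcases List.mem_append.mp hy with h1 | h1
        · exact he y h1 w hw hnm
        · have h1' : y = x := by simpa using h1
          have hwx : pvNm w = pvNm x := by rw [← hnm, h1']
          have hwe : w = e := hc w e hw hes (hwx.trans hen.symm)
          rw [h1', hwe]
          exact hlt'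

lemma pv_inv_run (t : List (String × List (String × String)))
    (hN : (t.map Prod.fst).Nodup) :
    ∀ (rest p : List (String × List (String × String))), t = p ++ rest →
    pvINV t p → pvINV t t := by
  intro rest
  induction rest with
  | nil =>
    intro p hp hinv
    rw [List.append_nil] at hp
    rw [← hp] at hinv
    exact hinv
  | cons x rest ih =>
    intro p hp hinv
    exact ih (p ++ [x]) (by rw [hp, List.append_cons]) (pv_inv_step t hN p x rest hp hinv)

lemma pv_inv_nil (t : List (String × List (String × String))) : pvINV t [] := by
  refine ⟨rfl, fun n => rfl, ?_, ?_, ?_⟩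
  · intro kv kv' h; cases h
  · intro y h; cases h
  · intro y h; cases h

-- ===== B-side theory: the winner set selects exactly the first maxima =====

lemma pvBest_FM (b0 : String × List (String × String)) :
    ∀ rest, pvFM (pvBest b0 rest) (b0 :: rest) := by
  intro rest
  induction rest using List.reverseRecOn with
  | nil =>
    refine ⟨[], [], rfl, ?_, ?_⟩ <;> · intro w h; simp at h
  | append_singleton rest y ih =>
    obtain ⟨u, v, hsplit, hu, hv⟩ := ih
    have hfold : pvBest b0 (rest ++ [y]) =
        (if pvVr (pvBest b0 rest) < pvVr y then y else pvBest b0 rest) := by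
      unfold pvBest
      rw [List.foldl_append]
      rfl
    by_cases hlt : pvVr (pvBest b0 rest) < pvVr y
    · rw [hfold, if_pos hlt]
      refine ⟨b0 :: rest, [], by simp, ?_, by intro w h; cases h⟩
      intro w hw
      rw [hsplit] at hw
      rcases List.mem_append.mp hw with h1 | h1
      · exact lt_trans (hu w h1) hlt
      · rcases List.mem_cons.mp h1 with h2 | h2
        · rw [h2]; exact hlt
        · exact lt_of_le_of_lt (not_lt.mp (hv w h2)) hlt
    · rw [hfold, if_neg hlt]
      refine ⟨u, v ++ [y], by rw [show b0 :: (rest ++ [y]) = (b0 :: rest) ++ [y] by simp, hsplit]; simp, hu, ?_⟩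
      intro w hw
      rcases List.mem_append.mp hw with h1 | h1
      · exact hv w h1
      · rw [show w = y by simpa using h1]
        exact hlt

lemma pvFM_mem {x : String × List (String × String)} {g : List (String × List (String × String))}
    (h : pvFM x g) : x ∈ g := by
  obtain ⟨u, v, hsplit, -, -⟩ := h
  rw [hsplit]
  exact List.mem_append_right _ List.mem_cons_self

lemma pvFM_max {x : String × List (String × String)} {g : List (String × List (String × String))}
    (h : pvFM x g) : ∀ w ∈ g, pvVr w ≤ pvVr x := by
  obtain ⟨u, v, hsplit, hu, hv⟩ := h
  intro w hw
  rw [hsplit] at hw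
  rcases List.mem_append.mp hw with h1 | h1
  · exact le_of_lt (hu w h1)
  · rcases List.mem_cons.mp h1 with h2 | h2
    · rw [h2]
    · exact not_lt.mp (hv w h2)

lemma pvFM_find {x : String × List (String × String)} {g : List (String × List (String × String))}
    (h : pvFM x g) : g.find? (fun w => decide (pvVr x ≤ pvVr w)) = some x := by
  obtain ⟨u, v, hsplit, hu, -⟩ := h
  rw [hsplit, List.find?_append]
  have hun : u.find? (fun w => decide (pvVr x ≤ pvVr w)) = none := by
    apply List.find?_eq_none.mpr
    intro w hw
    simpa using not_le.mpr (hu w hw)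
  rw [hun]
  simp

lemma pvFM_unique {x y : String × List (String × String)} {g : List (String × List (String × String))}
    (hx : pvFM x g) (hy : pvFM y g) : x = y := by
  have hvy : pvVr y ≤ pvVr x := pvFM_max hx y (pvFM_mem hy)
  have hvx : pvVr x ≤ pvVr y := pvFM_max hy x (pvFM_mem hx)
  have hv : pvVr x = pvVr y := le_antisymm hvx hvy
  have h1 := pvFM_find hx
  have h2 := pvFM_find hy
  rw [hv] at h1
  rw [h1] at h2
  exact Option.some_injective _ h2

lemma pvBestOf_FM {g : List (String × List (String × String))} {x : String × List (String × String)}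
    (h : pvBestOf g = some x) : pvFM x g := by
  cases g with
  | nil => cases h
  | cons b0 rest =>
    have hx : pvBest b0 rest = x := by simpa [pvBestOf] using h
    rw [← hx]
    exact pvBest_FM b0 rest

lemma pvKeep_iff (b v : List (String × List (String × String))) (x : String × List (String × String)) :
    pvKeep b x.2 v = true ↔
      (∀ w ∈ b, pvNm w = pvNm x → pvVr w < pvVr x) ∧ (∀ w ∈ v, pvNm w = pvNm x → ¬ pvVr x < pvVr w) := by
  show (if (b.any fun kv => pvLookup kv.2 "classifier_name" == pvLookup x.2 "classifier_name" && !decide (pvLookup kv.2 "classifier_version" < pvLookup x.2 "classifier_version")) = true then false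
        else v.all fun kv => !(pvLookup kv.2 "classifier_name" == pvLookup x.2 "classifier_name") || !decide (pvLookup x.2 "classifier_version" < pvLookup kv.2 "classifier_version")) = true ↔ _
  by_cases hb : (b.any fun kv => pvLookup kv.2 "classifier_name" == pvLookup x.2 "classifier_name" && !decide (pvLookup kv.2 "classifier_version" < pvLookup x.2 "classifier_version")) = true
  · rw [if_pos hb]
    simp only [List.any_eq_true] at hb
    obtain ⟨kv, hkv, hpred⟩ := hb
    simp only [Bool.and_eq_true, beq_iff_eq, Bool.not_eq_true', decide_eq_false_iff_not] at hpred
    constructor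
    · intro h; cases h
    · intro h
      exact absurd (h.1 kv hkv hpred.1) hpred.2
  · rw [if_neg hb]
    simp only [List.any_eq_true, not_exists] at hb
    constructor
    · intro hall
      refine ⟨?_, ?_⟩
      · intro kv hkv hnm
        by_contra hlt
        exact hb kv ⟨hkv, by simp [pvNm, pvVr] at hnm hlt ⊢; exact ⟨hnm, hlt⟩⟩
      · intro kv hkv hnm hlt
        have := List.all_eq_true.mp hall kv hkv
        simp only [pvNm, pvVr] at hnm hlt
        simp [hnm, hlt] at this
    · intro h
      apply List.all_eq_true.mpr
      intro kv hkv
      by_cases hnm : pvNm kv = pvNm x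
      · have := h.2 kv hkv hnm
        simp only [pvVr] at this
        simp [this]
      · simp only [pvNm] at hnm
        simp [hnm]

lemma mem_pvSelect_iff : ∀ (l b : List (String × List (String × String))) (x : String × List (String × String)),
    x ∈ pvSelect b l ↔ ∃ u v, l = u ++ x :: v ∧ pvKeep (b ++ u) x.2 v = true := by
  intro l
  induction l with
  | nil =>
    intro b x
    constructor
    · intro h; cases h
    · rintro ⟨u, v, h, -⟩
      exact absurd h (by simp)
  | cons kv rest ih =>
    intro b x
    constructor
    · intro h
      unfold pvSelect at h
      by_cases hk : pvKeep b kv.2 rest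
      · rw [if_pos hk] at h
        rcases List.mem_cons.mp h with h1 | h1
        · subst h1
          exact ⟨[], rest, rfl, by simpa using hk⟩
        · obtain ⟨u, v, hsplit, hkeep⟩ := (ih (b ++ [kv]) x).mp h1
          exact ⟨kv :: u, v, by simp [hsplit], by rw [List.append_assoc] at hkeep; exact hkeep⟩
      · rw [if_neg hk] at h
        obtain ⟨u, v, hsplit, hkeep⟩ := (ih (b ++ [kv]) x).mp h
        exact ⟨kv :: u, v, by simp [hsplit], by rw [List.append_assoc] at hkeep; exact hkeep⟩
    · rintro ⟨u, v, hsplit, hkeep⟩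
      cases u with
      | nil =>
        simp only [List.nil_append] at hsplit
        injection hsplit with h1 h2
        subst h1; subst h2
        unfold pvSelect
        rw [if_pos (by simpa using hkeep)]
        exact List.mem_cons_self
      | cons a u' =>
        injection hsplit with h1 h2
        subst h1
        have hx : x ∈ pvSelect (b ++ [kv]) rest := by
          apply (ih (b ++ [kv]) x).mpr
          exact ⟨u', v, h2, by rw [List.append_assoc]; exact hkeep⟩
        unfold pvSelect
        by_cases hk : pvKeep b kv.2 rest
        · rw [if_pos hk]; exact List.mem_cons_of_mem _ hx
        · rw [if_neg hk]; exact hx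

lemma pv_split_unique {x : String × List (String × String)} :
    ∀ (u u' v v' : List (String × List (String × String))), x ∉ u → x ∉ u' →
    u ++ x :: v = u' ++ x :: v' → u = u' ∧ v = v' := by
  intro u
  induction u with
  | nil =>
    intro u' v v' _ hx2 h
    cases u' with
    | nil => simpa using h
    | cons a u'' =>
      simp only [List.nil_append, List.cons_append] at h
      injection h with h1 h2
      exfalso
      apply hx2
      rw [h1]
      exact List.mem_cons_self
  | cons a u ih =>
    intro u' v v' hx1 hx2 h
    cases u' with
    | nil =>
      simp only [List.cons_append, List.nil_append] at h
      injection h with h1 h2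
      exfalso
      apply hx1
      rw [← h1]
      exact List.mem_cons_self
    | cons a' u'' =>
      simp only [List.cons_append] at h
      injection h with h1 h2
      obtain ⟨hu, hv⟩ := ih u'' v v' (fun hm => hx1 (List.mem_cons_of_mem _ hm)) (fun hm => hx2 (List.mem_cons_of_mem _ hm)) h2
      exact ⟨by rw [h1, hu], hv⟩

lemma pvGrp_split (l u v : List (String × List (String × String))) (x : String × List (String × String))
    (h : l = u ++ x :: v) :
    pvGrp l (pvNm x) = u.filter (fun kv => pvNm kv == pvNm x) ++ x :: v.filter (fun kv => pvNm kv == pvNm x) := by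
  rw [h]
  unfold pvGrp
  rw [List.filter_append, List.filter_cons]
  simp

-- for x ∈ l with distinct keys: x survives A's select iff x is the best of its group
lemma pv_main_mem (l : List (String × List (String × String)))
    (hN : (l.map Prod.fst).Nodup) (x : String × List (String × String)) (hx : x ∈ l) :
    (x ∈ pvSelect [] l ↔ pvBestOf (pvGrp l (pvNm x)) = some x) := by
  have hnd : l.Nodup := hN.of_map
  constructor
  · intro h
    obtain ⟨u, v, hsplit, hkeep⟩ := (mem_pvSelect_iff l [] x).mp h
    rw [List.nil_append] at hkeep
    obtain ⟨hu, hv⟩ := (pvKeep_iff u v x).mp hkeep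
    have hgs := pvGrp_split l u v x hsplit
    have hFMx : pvFM x (pvGrp l (pvNm x)) := by
      refine ⟨u.filter (fun kv => pvNm kv == pvNm x), v.filter (fun kv => pvNm kv == pvNm x), hgs, ?_, ?_⟩
      · intro w hw
        exact hu w (List.mem_of_mem_filter hw) (by simpa using List.of_mem_filter hw)
      · intro w hw
        exact hv w (List.mem_of_mem_filter hw) (by simpa using List.of_mem_filter hw)
    cases hg : pvGrp l (pvNm x) with
    | nil => rw [hg] at hgs; exact absurd hgs (by simp)
    | cons b0 rest =>
      have hb := pvBest_FM b0 rest
      rw [← hg] at hb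
      show some (pvBest b0 rest) = some x
      rw [pvFM_unique hb hFMx]
  · intro h
    have hFMx : pvFM x (pvGrp l (pvNm x)) := pvBestOf_FM h
    obtain ⟨u, v, hsplit⟩ := List.append_of_mem hx
    have hgs := pvGrp_split l u v x hsplit
    have hgnd : (pvGrp l (pvNm x)).Nodup := hnd.filter _
    obtain ⟨u', v', hsplit', hu', hv'⟩ := hFMx
    have hxnotu : x ∉ u.filter (fun kv => pvNm kv == pvNm x) := by
      intro hm
      have : ¬ (pvGrp l (pvNm x)).Nodup := by
        rw [hgs]
        simp only [List.nodup_append, not_and_or]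
        right; right
        intro hdisj
        exact hdisj x hm x List.mem_cons_self rfl
      exact this hgnd
    have hxnotu' : x ∉ u' := by
      intro hm
      have : ¬ (pvGrp l (pvNm x)).Nodup := by
        rw [hsplit']
        simp only [List.nodup_append, not_and_or]
        right; right
        intro hdisj
        exact hdisj x hm x List.mem_cons_self rfl
      exact this hgnd
    obtain ⟨hueq, hveq⟩ := pv_split_unique _ _ _ _ hxnotu' hxnotu (hsplit'.symm.trans hgs)
    apply (mem_pvSelect_iff l [] x).mpr
    refine ⟨u, v, hsplit, ?_⟩
    rw [List.nil_append]
    apply (pvKeep_iff u v x).mpr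
    constructor
    · intro w hw hnm
      apply hu'
      rw [hueq]
      exact List.mem_filter.mpr ⟨hw, by simpa using hnm⟩
    · intro w hw hnm
      apply hv'
      rw [hveq]
      exact List.mem_filter.mpr ⟨hw, by simpa using hnm⟩

-- the groups dict: distinct names in order, each mapped to its group
lemma pvGroups_getD (l : List (String × List (String × String))) (n : String) :
    (pvGroups l).getD n [] = pvGrp l n := by
  unfold pvGroups pvGrp
  have h : l.foldl (fun g kv => g.modify (pvNm kv) [] (fun grp => grp ++ [kv])) PySem.Dict.empty
      = (l.map (fun kv => (pvNm kv, kv))).foldl (fun d p => d.modify p.1 [] (fun grp => grp ++ [p.2])) PySem.Dict.empty := by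
    rw [List.foldl_map]
  rw [h, PySem.Dict.getD_foldl_modify_append, PySem.Dict.getD_empty, List.nil_append,
    List.filter_map, List.map_map]
  simp [Function.comp_def]

lemma pvGroups_keys (l : List (String × List (String × String))) :
    (pvGroups l).keys = PySem.Set.ofList (l.map pvNm) := by
  unfold pvGroups
  rw [PySem.Dict.keys_foldl_modify_key l pvNm [] (fun _ kv grp => grp ++ [kv]) PySem.Dict.empty]
  rw [PySem.Set.ofList_eq_foldl]
  rfl

lemma pvGroups_nodup_keys (l : List (String × List (String × String))) :
    (pvGroups l).keys.Nodup := by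
  unfold pvGroups
  exact PySem.Dict.nodup_keys_foldl_modify_key l pvNm [] (fun _ kv grp => grp ++ [kv]) PySem.Dict.empty PySem.Dict.nodup_keys_empty

lemma pvGroups_values (l : List (String × List (String × String))) :
    (pvGroups l).values = (PySem.Set.ofList (l.map pvNm)).map (fun n => pvGrp l n) := by
  rw [PySem.Dict.values_eq_map_keys (pvGroups l) (pvGroups_nodup_keys l) [], pvGroups_keys]
  apply List.map_congr_left
  intro n _
  exact pvGroups_getD l n

lemma pv_mem_winFold (gs : List (List (String × List (String × String)))) :
    ∀ (s : PySem.Set String) (k : String),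
    (k ∈ gs.foldl (fun ws grp =>
        match grp with
        | [] => ws
        | b0 :: rest => PySem.Set.add ws (pvBest b0 rest).1) s)
      ↔ k ∈ s ∨ ∃ g ∈ gs, ∃ x, pvBestOf g = some x ∧ k = x.1 := by
  induction gs with
  | nil => intro s k; simp
  | cons g gs ih =>
    intro s k
    rw [List.foldl_cons]
    cases g with
    | nil =>
      rw [show (match ([] : List (String × List (String × String))) with
        | [] => s
        | b0 :: rest => PySem.Set.add s (pvBest b0 rest).1) = s from rfl, ih]
      constructor
      · rintro (h | h)
        · exact Or.inl h
        · exact Or.inr (by obtain ⟨g', hg', hx⟩ := h; exact ⟨g', List.mem_cons_of_mem _ hg', hx⟩)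
      · rintro (h | ⟨g', hg', x, hx, hk⟩)
        · exact Or.inl h
        · rcases List.mem_cons.mp hg' with h1 | h1
          · rw [h1] at hx; cases hx
          · exact Or.inr ⟨g', h1, x, hx, hk⟩
    | cons b0 rest =>
      rw [show (match (b0 :: rest : List (String × List (String × String))) with
        | [] => s
        | b0 :: rest => PySem.Set.add s (pvBest b0 rest).1) = PySem.Set.add s (pvBest b0 rest).1 from rfl, ih]
      rw [PySem.Set.mem_add]
      constructor
      · rintro ((h | h) | h)
        · exact Or.inl h
        · exact Or.inr ⟨b0 :: rest, List.mem_cons_self, pvBest b0 rest, rfl, h⟩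
        · obtain ⟨g', hg', hx⟩ := h
          exact Or.inr ⟨g', List.mem_cons_of_mem _ hg', hx⟩
      · rintro (h | ⟨g', hg', x, hx, hk⟩)
        · exact Or.inl (Or.inl h)
        · rcases List.mem_cons.mp hg' with h1 | h1
          · subst h1
            have hxx : pvBest b0 rest = x := by simpa [pvBestOf] using hx
            exact Or.inl (Or.inr (by rw [hk, hxx]))
          · exact Or.inr ⟨g', h1, x, hx, hk⟩

lemma pv_winners_iff (l : List (String × List (String × String))) (k : String) :
    (k ∈ pvWinners l) ↔ ∃ n ∈ l.map pvNm, ∃ x, pvBestOf (pvGrp l n) = some x ∧ k = x.1 := by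
  unfold pvWinners
  rw [pvGroups_values, pv_mem_winFold]
  constructor
  · rintro (h | h)
    · cases h
    · obtain ⟨g, hg, x, hx, hk⟩ := h
      obtain ⟨n, hn, hgn⟩ := List.mem_map.mp hg
      exact ⟨n, (PySem.Set.mem_ofList _ _).mp hn, x, hgn ▸ hx, hk⟩
  · rintro ⟨n, hn, x, hx, hk⟩
    exact Or.inr ⟨pvGrp l n, List.mem_map.mpr ⟨n, (PySem.Set.mem_ofList _ _).mpr hn, rfl⟩, x, hx, hk⟩

lemma pv_sublist_eq_filter {α : Type} (p : α → Bool) :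
    ∀ {s l : List α}, s.Sublist l → l.Nodup → (∀ x ∈ l, (x ∈ s ↔ p x = true)) → s = l.filter p := by
  intro s l hs
  induction hs with
  | slnil => intro _ _; rfl
  | @cons s l a hsl ih =>
    intro hnd hmem
    have hna : a ∉ l := (List.nodup_cons.mp hnd).1
    have hpa : p a = false := by
      by_contra hp
      have hain : a ∈ s := (hmem a List.mem_cons_self).mpr (by simpa using hp)
      exact hna (hsl.subset hain)
    rw [List.filter_cons, hpa]
    simp only [Bool.false_eq_true, if_false]
    exact ih (List.nodup_cons.mp hnd).2 (fun x hx => hmem x (List.mem_cons_of_mem _ hx))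
  | @cons₂ s l a hsl ih =>
    intro hnd hmem
    have hna : a ∉ l := (List.nodup_cons.mp hnd).1
    have hpa : p a = true := (hmem a List.mem_cons_self).mp List.mem_cons_self
    rw [List.filter_cons, hpa]
    simp only [if_true]
    congr 1
    apply ih (List.nodup_cons.mp hnd).2
    intro x hx
    constructor
    · intro hxs
      exact (hmem x (List.mem_cons_of_mem _ hx)).mp (List.mem_cons_of_mem _ hxs)
    · intro hp
      rcases List.mem_cons.mp ((hmem x (List.mem_cons_of_mem _ hx)).mpr hp) with h1 | h1
      · exact absurd (h1 ▸ hx) hna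
      · exact h1

lemma pvSelect_sublist : ∀ (l b : List (String × List (String × String))),
    (pvSelect b l).Sublist l := by
  intro l
  induction l with
  | nil => intro b; exact List.Sublist.refl []
  | cons a l ih =>
    intro b
    unfold pvSelect
    by_cases hk : pvKeep b a.2 l
    · rw [if_pos hk]
      exact (ih (b ++ [a])).cons₂ a
    · rw [if_neg hk]
      exact (ih (b ++ [a])).cons a

-- the core equivalence on the whitelisted list
lemma pv_core (l : List (String × List (String × String)))
    (hN : (l.map Prod.fst).Nodup) :
    pvSelect [] l = pvBCore l := by
  unfold pvBCore
  apply pv_sublist_eq_filter _ (pvSelect_sublist l []) hN.of_map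
  intro x hx
  rw [pv_main_mem l hN x hx]
  constructor
  · intro h
    show (PySem.Set.contains (pvWinners l) x.1) = true
    have : x.1 ∈ pvWinners l :=
      (pv_winners_iff l x.1).mpr ⟨pvNm x, List.mem_map.mpr ⟨x, hx, rfl⟩, x, h, rfl⟩
    simpa [PySem.Set.contains] using this
  · intro h
    have hmem : x.1 ∈ pvWinners l := by simpa [PySem.Set.contains] using h
    obtain ⟨n, hn, y, hy, hk⟩ := (pv_winners_iff l x.1).mp hmem
    have hyg : y ∈ pvGrp l n := pvFM_mem (pvBestOf_FM hy)
    have hyl : y ∈ l := List.mem_of_mem_filter hyg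
    have hxy : x = y := pv_key_inj hN hx hyl hk
    subst hxy
    have hnx : pvNm x = n := by simpa using List.of_mem_filter hyg
    rwa [hnx]

-- ===== VERDICT (by name: the statement is the Claim_ definition above) =====
theorem filter_classifier_name_taxonomy_spec : Claim_equal_filter_classifier_name_taxonomy := by
  intro td hdom hpre
  obtain ⟨hN, -, -, -⟩ := hpre
  have hNt : ((td.filter pvP).map Prod.fst).Nodup :=
    List.Nodup.sublist (List.Sublist.map Prod.fst List.filter_sublist) hN
  have hinv := pv_inv_run (td.filter pvP) hNt (td.filter pvP) [] rfl (pv_inv_nil _)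
  show filter_classifier_name_taxonomy td = filter_classifier_name_taxonomy_alt td
  rw [pv_phase1 td hN, hinv.1, pv_phase1_alt td hN]
  exact pv_core (td.filter pvP) hNt
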